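-- pv_equiv track=rewrite | github.com/dleemiller/CnakeCharmer | cnake_data/unpaired/static_sentencizer_rules.py | cpredict
-- ===== SOURCE A (Python) =====
-- def cpredict(
--     token_starts: list[int],
--     token_ends: list[int],
--     text: str,
--     sentence_end_chars: set[str],
--     min_sent_len: int = 1,
-- ) -> list[int]:
--     """Return indices where sentence breaks should occur."""
--     n = len(token_starts)
--     if n == 0:
--         return []
--
--     boundaries: list[int] = []
--     last_boundary = 0
--
--     for i in range(n):
--         end = token_ends[i]
--         ch = text[end - 1] if end > 0 else ""
--         if ch in sentence_end_chars and (i - last_boundary + 1) >= min_sent_len: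
--             boundaries.append(i)
--             last_boundary = i + 1
--
--     if not boundaries or boundaries[-1] != n - 1:
--         boundaries.append(n - 1)
--
--     return boundaries
-- ===== SOURCE B (Python) =====
-- def cpredict(
--     token_starts: list[int],
--     token_ends: list[int],
--     text: str,
--     sentence_end_chars: set[str],
--     min_sent_len: int = 1,
-- ) -> list[int]:
--     """Repeated next-boundary search: each sentence skips its first
--     min_sent_len-1 tokens outright (no character test there), then scans
--     for the first token whose end character is a sentence-end char."""
--     n = len(token_starts)
--     if n == 0:
--         return []
--
--     def next_boundary(last):
--         i = max(last, last + min_sent_len - 1)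
--         while i < n:
--             e = token_ends[i]
--             if (text[e - 1] if e > 0 else "") in sentence_end_chars:
--                 return i
--             i += 1
--         return None
--
--     boundaries: list[int] = []
--     last = 0
--     while True:
--         j = next_boundary(last)
--         if j is None:
--             break
--         boundaries.append(j)
--         last = j + 1
--
--     if not boundaries or boundaries[-1] != n - 1:
--         boundaries.append(n - 1)
--     return boundaries
-- ===== Notes on version B (the rewrite author's own statement) =====
-- stated objective: alternative
-- what changed: Replaces A's single stateful pass over every token index by an outer loop of next-boundary searches: after each boundary the inner scan restarts at last+min_sent_len-1, so the first min_sent_len-1 tokens of each sentence are skipped without any character test.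
import Mathlib
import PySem

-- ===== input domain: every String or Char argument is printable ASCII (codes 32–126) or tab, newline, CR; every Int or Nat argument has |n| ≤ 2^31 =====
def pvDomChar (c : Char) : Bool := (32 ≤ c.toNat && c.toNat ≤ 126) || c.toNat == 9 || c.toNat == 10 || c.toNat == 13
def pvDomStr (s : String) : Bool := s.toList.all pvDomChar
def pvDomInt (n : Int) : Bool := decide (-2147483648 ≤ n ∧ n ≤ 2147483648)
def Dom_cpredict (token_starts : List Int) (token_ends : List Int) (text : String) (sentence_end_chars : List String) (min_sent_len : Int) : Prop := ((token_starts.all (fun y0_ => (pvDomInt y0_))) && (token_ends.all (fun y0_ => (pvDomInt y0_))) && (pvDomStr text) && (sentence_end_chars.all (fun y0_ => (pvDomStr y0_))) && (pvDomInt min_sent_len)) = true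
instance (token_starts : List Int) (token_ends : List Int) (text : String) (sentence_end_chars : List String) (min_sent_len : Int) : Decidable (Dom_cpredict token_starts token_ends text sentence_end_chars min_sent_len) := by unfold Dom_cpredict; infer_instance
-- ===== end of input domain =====

-- B replaces A's single stateful pass over all token indices by an outer loop of
-- next-boundary searches whose inner scan starts at last+min_sent_len-1; same return value.

-- text[i] as a 1-char string; "" on the IndexError case (excluded by Pre_cpredict)
def pvCharAt (text : String) (i : Int) : String :=
  match PySem.Str.pyGet? text i with
  | some c => String.ofList [c]
  | none => ""

-- ===== PORT A =====
def cpredict (token_starts : List Int) (token_ends : List Int) (text : String) (sentence_end_chars : List String) (min_sent_len : Int) : List Int :=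
  let n := token_starts.length
  if n = 0 then []
  else
    -- the for-loop: state = (boundaries, last_boundary)
    let st := (List.range n).foldl (fun (st : List Int × Int) (i : Nat) =>
      let e := PySem.List.pyGetD token_ends (i : Int) 0  -- exact under Pre_ (i < len token_ends)
      let ch := if e > 0 then pvCharAt text (e - 1) else ""
      if PySem.Set.contains sentence_end_chars ch = true ∧ (i : Int) - st.2 + 1 ≥ min_sent_len then
        (st.1 ++ [(i : Int)], (i : Int) + 1)
      else st) ([], 0)
    let boundaries := st.1
    -- 'if not boundaries or boundaries[-1] != n - 1'
    if boundaries.getLast? = some ((n : Int) - 1) then boundaries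
    else boundaries ++ [(n : Int) - 1]

-- ===== PORT B =====
-- inner while of next_boundary: linear scan i, i+1, …, n-1 for the first isEnd index
-- (none = Python's None)
def findNext (isEnd : Nat → Bool) (n : Nat) (i : Nat) : Option Nat :=
  (List.range' i (n - i)).find? isEnd

-- outer while loop with a fuel guard (last strictly increases, so n + 1 - last fuel suffices);
-- 'i = max(last, last + min_sent_len - 1)' is written last + (min_sent_len - 1).toNat
def emitGo (isEnd : Nat → Bool) (n : Nat) (minLen : Int) : Nat → Nat → List Nat
  | 0, _ => []
  | fuel + 1, last =>
    match findNext isEnd n (last + (minLen - 1).toNat) with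
    | none => []
    | some j => j :: emitGo isEnd n minLen fuel (j + 1)

def emitFrom (isEnd : Nat → Bool) (n : Nat) (minLen : Int) (last : Nat) : List Nat :=
  emitGo isEnd n minLen (n + 1 - last) last

def cpredict_alt (token_starts : List Int) (token_ends : List Int) (text : String) (sentence_end_chars : List String) (min_sent_len : Int) : List Int :=
  let n := token_starts.length
  if n = 0 then []
  else
    let isEnd : Nat → Bool := fun i =>
      let e := PySem.List.pyGetD token_ends (i : Int) 0
      PySem.Set.contains sentence_end_chars (if e > 0 then pvCharAt text (e - 1) else "")
    let boundaries := (emitFrom isEnd n min_sent_len 0).map (fun j => (j : Int))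
    if boundaries.getLast? = some ((n : Int) - 1) then boundaries
    else boundaries ++ [(n : Int) - 1]

-- ===== PRECONDITION & SPEC =====
-- Pre_ excludes exactly the inputs on which A raises IndexError: a missing token_ends entry
-- (len(token_ends) < len(token_starts)) or a positive end offset past the end of text.
def Pre_cpredict (token_starts : List Int) (token_ends : List Int) (text : String) (sentence_end_chars : List String) (min_sent_len : Int) : Prop :=
  token_starts.length ≤ token_ends.length ∧
  ∀ e ∈ token_ends.take token_starts.length, e ≤ (text.toList.length : Int)
instance (token_starts : List Int) (token_ends : List Int) (text : String) (sentence_end_chars : List String) (min_sent_len : Int) : Decidable (Pre_cpredict token_starts token_ends text sentence_end_chars min_sent_len) := by unfold Pre_cpredict; infer_instance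

def pvWitness_cpredict : List Int × List Int × String × List String × Int :=
  ([0, 1, 2, 3], [1, 2, 3, 4], "a.b.", ["."], 1)

def Spec_cpredict (token_starts : List Int) (token_ends : List Int) (text : String) (sentence_end_chars : List String) (min_sent_len : Int) (out : List Int) : Prop := out = cpredict_alt token_starts token_ends text sentence_end_chars min_sent_len
instance (token_starts : List Int) (token_ends : List Int) (text : String) (sentence_end_chars : List String) (min_sent_len : Int) (out : List Int) : Decidable (Spec_cpredict token_starts token_ends text sentence_end_chars min_sent_len out) := by unfold Spec_cpredict; infer_instance

-- ===== CLAIM (what is proved, stated in full; the proofs are below) =====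
def Claim_equal_cpredict : Prop := ∀ (token_starts : List Int) (token_ends : List Int) (text : String) (sentence_end_chars : List String) (min_sent_len : Int), Dom_cpredict token_starts token_ends text sentence_end_chars min_sent_len → Pre_cpredict token_starts token_ends text sentence_end_chars min_sent_len → Spec_cpredict token_starts token_ends text sentence_end_chars min_sent_len (cpredict token_starts token_ends text sentence_end_chars min_sent_len)

-- ===== LEMMAS AND PROOFS =====

theorem findNext_none (isEnd : Nat → Bool) (n i : Nat) (h : n ≤ i) :
    findNext isEnd n i = none := by
  simp [findNext, Nat.sub_eq_zero_of_le h]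

theorem findNext_step (isEnd : Nat → Bool) (n i : Nat) (h : i < n) :
    findNext isEnd n i = if isEnd i then some i else findNext isEnd n (i + 1) := by
  unfold findNext
  rw [show n - i = (n - (i + 1)) + 1 from by omega, List.range'_succ]
  by_cases he : isEnd i = true
  · rw [List.find?_cons_of_pos he, if_pos he]
  · rw [List.find?_cons_of_neg he, if_neg he]

theorem findNext_some (isEnd : Nat → Bool) (n i j : Nat) (h : findNext isEnd n i = some j) :
    i ≤ j ∧ j < n := by
  unfold findNext at h
  have hj := List.mem_range'_1.mp (List.mem_of_find?_eq_some h)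
  omega

theorem emitGo_nil (isEnd : Nat → Bool) (n : Nat) (minLen : Int) (last : Nat) (h : n < last) :
    ∀ fuel, emitGo isEnd n minLen fuel last = [] := by
  intro fuel
  cases fuel with
  | zero => rfl
  | succ f =>
    unfold emitGo
    rw [findNext_none isEnd n _ (by omega)]

-- the outer loop's fuel is irrelevant once it covers n + 1 - last iterations
theorem emitGo_congr (isEnd : Nat → Bool) (n : Nat) (minLen : Int) :
    ∀ (fuel fuel' last : Nat), n + 1 - last ≤ fuel → n + 1 - last ≤ fuel' →
      emitGo isEnd n minLen fuel last = emitGo isEnd n minLen fuel' last := by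
  intro fuel
  induction fuel with
  | zero =>
    intro fuel' last h h'
    rw [emitGo_nil isEnd n minLen last (by omega), emitGo_nil isEnd n minLen last (by omega)]
  | succ f ih =>
    intro fuel' last h h'
    by_cases hl : n < last
    · rw [emitGo_nil isEnd n minLen last hl, emitGo_nil isEnd n minLen last hl]
    · cases fuel' with
      | zero => omega
      | succ f' =>
        unfold emitGo
        rcases hf : findNext isEnd n (last + (minLen - 1).toNat) with _ | j
        · rfl
        · have hj := findNext_some isEnd n _ j hf
          simp only []
          rw [ih f' (j + 1) (by omega) (by omega)]

-- one unfolding of the outer loop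
theorem emitFrom_eq (isEnd : Nat → Bool) (n : Nat) (minLen : Int) (last : Nat) :
    emitFrom isEnd n minLen last =
      match findNext isEnd n (last + (minLen - 1).toNat) with
      | none => []
      | some j => j :: emitFrom isEnd n minLen (j + 1) := by
  by_cases hl : n < last
  · have h0 : findNext isEnd n (last + (minLen - 1).toNat) = none :=
      findNext_none isEnd n _ (by omega)
    simp only [h0]
    unfold emitFrom
    exact emitGo_nil isEnd n minLen last hl _
  · unfold emitFrom
    rw [show n + 1 - last = (n - last) + 1 from by omega]
    simp only [emitGo]
    rcases hf : findNext isEnd n (last + (minLen - 1).toNat) with _ | j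
    · rfl
    · have hj := findNext_some isEnd n _ j hf
      show j :: emitGo isEnd n minLen (n - last) (j + 1)
         = j :: emitGo isEnd n minLen (n + 1 - (j + 1)) (j + 1)
      rw [emitGo_congr isEnd n minLen (n - last) (n + 1 - (j + 1)) (j + 1) (by omega) (by omega)]

-- proof-side: B's residual computation when A's scan stands at index i with last boundary lastN
def emitAux (isEnd : Nat → Bool) (n : Nat) (minLen : Int) (i lastN : Nat) : List Nat :=
  match findNext isEnd n (max i (lastN + (minLen - 1).toNat)) with
  | none => []
  | some j => j :: emitFrom isEnd n minLen (j + 1)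

theorem emitAux_self (isEnd : Nat → Bool) (n : Nat) (minLen : Int) (lastN : Nat) :
    emitAux isEnd n minLen lastN lastN = emitFrom isEnd n minLen lastN := by
  unfold emitAux
  rw [Nat.max_eq_right (Nat.le_add_right _ _), emitFrom_eq]

-- A's residual fold from index i equals b ++ B's residual output
theorem foldA_eq (isEnd : Nat → Bool) (n : Nat) (minLen : Int) :
    ∀ (m i lastN : Nat) (b : List Int), lastN ≤ i → i + m = n →
      ((List.range' i m).foldl (fun (st : List Int × Int) (k : Nat) =>
          if isEnd k = true ∧ (k : Int) - st.2 + 1 ≥ minLen then (st.1 ++ [(k : Int)], (k : Int) + 1) else st)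
        (b, (lastN : Int))).1
      = b ++ (emitAux isEnd n minLen i lastN).map (fun j => (j : Int)) := by
  intro m
  induction m with
  | zero =>
    intro i lastN b hle hin
    have hnone : findNext isEnd n (max i (lastN + (minLen - 1).toNat)) = none :=
      findNext_none isEnd n _ (by omega)
    unfold emitAux
    rw [hnone]
    simp [List.range']
  | succ m ih =>
    intro i lastN b hle hin
    rw [List.range'_succ, List.foldl_cons]
    by_cases hc : isEnd i = true ∧ (i : Int) - (lastN : Int) + 1 ≥ minLen
    · rw [if_pos hc]
      have hcast : ((i : Int) + 1) = (((i + 1 : Nat)) : Int) := by push_cast; ring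
      rw [hcast, ih (i + 1) (i + 1) (b ++ [(i : Int)]) le_rfl (by omega)]
      have hfind : findNext isEnd n (max i (lastN + (minLen - 1).toNat)) = some i := by
        rw [Nat.max_eq_left (by omega), findNext_step isEnd n i (by omega), if_pos hc.1]
      rw [emitAux_self]
      unfold emitAux
      rw [hfind]
      simp
    · rw [if_neg hc]
      rw [ih (i + 1) lastN b (by omega) (by omega)]
      have haux : emitAux isEnd n minLen (i + 1) lastN = emitAux isEnd n minLen i lastN := by
        by_cases hs : i < lastN + (minLen - 1).toNat
        · unfold emitAux
          rw [Nat.max_eq_right (by omega), Nat.max_eq_right (by omega)]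
        · -- i ≥ threshold, so A's failure means isEnd i = false
          have he : isEnd i = false := by
            by_contra hne
            exact hc ⟨by simpa using hne, by omega⟩
          have hstep : findNext isEnd n i = findNext isEnd n (i + 1) := by
            rw [findNext_step isEnd n i (by omega), if_neg (by simp [he])]
          unfold emitAux
          rw [Nat.max_eq_left (by omega), Nat.max_eq_left (by omega), hstep]
      rw [haux]

-- ===== VERDICT (by name: the statement is the Claim_ definition above) =====
theorem cpredict_spec : Claim_equal_cpredict := by
  intro token_starts token_ends text sentence_end_chars min_sent_len _ _
  unfold Spec_cpredict cpredict cpredict_alt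
  by_cases h : token_starts.length = 0
  · simp [h]
  · simp only [h, if_false]
    have key := foldA_eq
      (fun i =>
        let e := PySem.List.pyGetD token_ends (i : Int) 0
        PySem.Set.contains sentence_end_chars (if e > 0 then pvCharAt text (e - 1) else ""))
      token_starts.length min_sent_len token_starts.length 0 0 [] (Nat.zero_le _) (by omega)
    rw [emitAux_self, Nat.cast_zero] at key
    simp only [] at key
    rw [List.range_eq_range', key, List.nil_append]
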